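-- pv_equiv track=rewrite | github.com/silverspoon0099/ml-bot-30m | features/sessions.py | primary_session
-- ===== SOURCE A (Python) =====
-- def primary_session(hour: int) -> str:
--     """Most-recently-opened session at this hour. Used for "minutes_into_session"."""
--     # Order by start hour ascending; session whose start is closest to (and <=) hour.
--     starts = [
--         ("tokyo", 0),
--         ("london", 7),
--         ("new_york", 13),
--         ("sydney", 21),
--     ]
--     chosen = "sydney"
--     for name, h in starts:
--         if h <= hour:
--             chosen = name
--     return chosen
-- ===== SOURCE B (Python) =====
-- def primary_session(hour: int) -> str:
--     # Binary-search (bisect_right) over session start hours; names[i-1] with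
--     # Python's negative indexing gives 'sydney' for hour < 0.
--     hours = [0, 7, 13, 21]
--     names = ["tokyo", "london", "new_york", "sydney"]
--     lo, hi = 0, len(hours)
--     while lo < hi:
--         mid = (lo + hi) // 2
--         if hour < hours[mid]:
--             hi = mid
--         else:
--             lo = mid + 1
--     return names[lo - 1]
-- ===== Notes on version B (the rewrite author's own statement) =====
-- stated objective: alternative
-- what changed: Replaces the linear fold over (name, start) pairs with a hand-rolled bisect_right binary search over the start hours, returning names[lo-1] and relying on negative indexing for the hour<0 fallback.
import Mathlib
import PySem

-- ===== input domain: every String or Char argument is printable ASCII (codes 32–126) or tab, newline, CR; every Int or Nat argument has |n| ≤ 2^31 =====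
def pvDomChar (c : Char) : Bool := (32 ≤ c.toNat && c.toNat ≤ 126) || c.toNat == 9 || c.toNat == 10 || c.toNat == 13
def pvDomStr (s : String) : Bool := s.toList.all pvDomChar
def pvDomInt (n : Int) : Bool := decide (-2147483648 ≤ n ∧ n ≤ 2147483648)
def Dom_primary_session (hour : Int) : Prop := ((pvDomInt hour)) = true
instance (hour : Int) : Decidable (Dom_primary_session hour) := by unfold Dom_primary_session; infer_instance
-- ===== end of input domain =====

-- B replaces A's linear scan over (name, start) pairs with a bisect_right binary search
-- over the start hours (objective: alternative; same observable behaviour).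

-- ===== PORT A =====
def primary_session (hour : Int) : String :=
  let starts : List (String × Int) :=
    [("tokyo", 0), ("london", 7), ("new_york", 13), ("sydney", 21)]
  starts.foldl (fun chosen nh => if nh.2 ≤ hour then nh.1 else chosen) "sydney"

-- ===== PORT B =====
-- Source B's while-loop as recursion on hi - lo; (lo+hi)//2 on Nats equals Python's //,
-- and hours[mid] is ported by PySem.List.pyGet? (always in range here), exact.
def pvBisect (hours : List Int) (hour : Int) (lo hi : Nat) : Nat :=
  if lo < hi then
    let mid := (lo + hi) / 2
    if hour < (PySem.List.pyGet? hours (mid : Int)).getD 0 then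
      pvBisect hours hour lo mid
    else
      pvBisect hours hour (mid + 1) hi
  else lo
termination_by hi - lo
decreasing_by all_goals omega

def primary_session_alt (hour : Int) : String :=
  let hours : List Int := [0, 7, 13, 21]
  let names : List String := ["tokyo", "london", "new_york", "sydney"]
  let lo := pvBisect hours hour 0 hours.length
  -- names[lo - 1] with Python's negative-index rule (lo = 0 → names[-1]), exact via pyGet?
  (PySem.List.pyGet? names ((lo : Int) - 1)).getD ""

-- ===== PRECONDITION & SPEC =====
def Spec_primary_session (hour : Int) (out : String) : Prop := out = primary_session_alt hour
instance (hour : Int) (out : String) : Decidable (Spec_primary_session hour out) := by unfold Spec_primary_session; infer_instance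

-- ===== CLAIM (what is proved, stated in full; the proofs are below) =====
def Claim_equal_primary_session : Prop := ∀ (hour : Int), Dom_primary_session hour → Spec_primary_session hour (primary_session hour)

-- ===== LEMMAS AND PROOFS =====
theorem pvBisect_lt0 (hour : Int) (h : hour < 0) : pvBisect [0,7,13,21] hour 0 4 = 0 := by
  rw [pvBisect.eq_def]
  norm_num [PySem.List.pyGet?, PySem.List.pyIdx?, show Int.toNat 2 = 2 from rfl]
  rw [if_pos (by omega : hour < 13), pvBisect.eq_def]
  norm_num [PySem.List.pyGet?, PySem.List.pyIdx?, show Int.toNat 1 = 1 from rfl]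
  rw [if_pos (by omega : hour < 7), pvBisect.eq_def]
  norm_num [PySem.List.pyGet?, PySem.List.pyIdx?, show Int.toNat 0 = 0 from rfl]
  rw [if_pos h, pvBisect.eq_def]
  norm_num

theorem pvBisect_0_7 (hour : Int) (h0 : 0 ≤ hour) (h7 : hour < 7) :
    pvBisect [0,7,13,21] hour 0 4 = 1 := by
  rw [pvBisect.eq_def]
  norm_num [PySem.List.pyGet?, PySem.List.pyIdx?, show Int.toNat 2 = 2 from rfl]
  rw [if_pos (by omega : hour < 13), pvBisect.eq_def]
  norm_num [PySem.List.pyGet?, PySem.List.pyIdx?, show Int.toNat 1 = 1 from rfl]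
  rw [if_pos h7, pvBisect.eq_def]
  norm_num [PySem.List.pyGet?, PySem.List.pyIdx?, show Int.toNat 0 = 0 from rfl]
  rw [if_neg (by omega : ¬ hour < 0), pvBisect.eq_def]
  norm_num

theorem pvBisect_7_13 (hour : Int) (h7 : 7 ≤ hour) (h13 : hour < 13) :
    pvBisect [0,7,13,21] hour 0 4 = 2 := by
  rw [pvBisect.eq_def]
  norm_num [PySem.List.pyGet?, PySem.List.pyIdx?, show Int.toNat 2 = 2 from rfl]
  rw [if_pos h13, pvBisect.eq_def]
  norm_num [PySem.List.pyGet?, PySem.List.pyIdx?, show Int.toNat 1 = 1 from rfl]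
  rw [if_neg (by omega : ¬ hour < 7), pvBisect.eq_def]
  norm_num

theorem pvBisect_13_21 (hour : Int) (h13 : 13 ≤ hour) (h21 : hour < 21) :
    pvBisect [0,7,13,21] hour 0 4 = 3 := by
  rw [pvBisect.eq_def]
  norm_num [PySem.List.pyGet?, PySem.List.pyIdx?, show Int.toNat 2 = 2 from rfl]
  rw [if_neg (by omega : ¬ hour < 13), pvBisect.eq_def]
  norm_num [PySem.List.pyGet?, PySem.List.pyIdx?, show Int.toNat 3 = 3 from rfl]
  rw [if_pos h21, pvBisect.eq_def]
  norm_num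

theorem pvBisect_ge21 (hour : Int) (h : 21 ≤ hour) : pvBisect [0,7,13,21] hour 0 4 = 4 := by
  rw [pvBisect.eq_def]
  norm_num [PySem.List.pyGet?, PySem.List.pyIdx?, show Int.toNat 2 = 2 from rfl]
  rw [if_neg (by omega : ¬ hour < 13), pvBisect.eq_def]
  norm_num [PySem.List.pyGet?, PySem.List.pyIdx?, show Int.toNat 3 = 3 from rfl]
  rw [if_neg (by omega : ¬ hour < 21), pvBisect.eq_def]
  norm_num

theorem primary_session_eq_alt (hour : Int) :
    primary_session hour = primary_session_alt hour := by
  unfold primary_session primary_session_alt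
  simp only [List.foldl, List.length_cons, List.length_nil]
  rcases lt_or_ge hour 0 with h | h0
  · rw [pvBisect_lt0 hour h]
    simp [show ¬ (0:Int) ≤ hour from by omega, show ¬ (7:Int) ≤ hour from by omega,
          show ¬ (13:Int) ≤ hour from by omega, show ¬ (21:Int) ≤ hour from by omega,
          PySem.List.pyGet?, PySem.List.pyIdx?]
  rcases lt_or_ge hour 7 with h | h7
  · rw [pvBisect_0_7 hour h0 h]
    simp [h0, show ¬ (7:Int) ≤ hour from by omega, show ¬ (13:Int) ≤ hour from by omega,
          show ¬ (21:Int) ≤ hour from by omega, PySem.List.pyGet?, PySem.List.pyIdx?]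
  rcases lt_or_ge hour 13 with h | h13
  · rw [pvBisect_7_13 hour h7 h]
    simp [h7, show ¬ (13:Int) ≤ hour from by omega, show ¬ (21:Int) ≤ hour from by omega,
          PySem.List.pyGet?, PySem.List.pyIdx?]
  rcases lt_or_ge hour 21 with h | h21
  · rw [pvBisect_13_21 hour h13 h]
    simp [h13, show ¬ (21:Int) ≤ hour from by omega,
          PySem.List.pyGet?, PySem.List.pyIdx?]
  · rw [pvBisect_ge21 hour h21]
    simp [h21, PySem.List.pyGet?, PySem.List.pyIdx?]

-- ===== VERDICT (by name: the statement is the Claim_ definition above) =====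
theorem primary_session_spec : Claim_equal_primary_session := by
  intro hour _
  exact primary_session_eq_alt hour
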